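-- pv_equiv track=rewrite | github.com/nishtha-kalra/Data-Structure | minSwaps.py | swapNumbers
-- ===== SOURCE A (Python) =====
-- def swapNumbers(arr):
--     min_index = arr.index(min(arr))
--     swaps = 0
--
--     while min_index > 0:
--         arr[min_index], arr[min_index-1] = arr[min_index-1], arr[min_index]
--         swaps += 1
--         min_index -= 1
--     max_index = arr.index(max(arr))
--     while max_index < len(arr) - 1:
--         arr[max_index], arr[max_index+1] = arr[max_index+1], arr[max_index]
--         max_index += 1
--         swaps += 1
--     return (swaps)
-- ===== SOURCE B (Python) =====
-- def swapNumbers(arr):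
--     m = min(arr)
--     i = arr.index(m)
--     arr.pop(i)
--     arr.insert(0, m)
--     M = max(arr)
--     j = arr.index(M)
--     swaps = i + (len(arr) - 1 - j)
--     arr.pop(j)
--     arr.append(M)
--     return swaps
-- ===== Notes on version B (the rewrite author's own statement) =====
-- stated objective: simpler
-- what changed: Replaces both adjacent-swap while loops with a single pop/insert move and arithmetic (i for moving the min to the front, len-1-j for moving the max to the end, j taken on the list after the min move).
-- outside the precondition, e.g. on swapNumbers([]): A raises ValueError, B raises ValueError
import Mathlib
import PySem

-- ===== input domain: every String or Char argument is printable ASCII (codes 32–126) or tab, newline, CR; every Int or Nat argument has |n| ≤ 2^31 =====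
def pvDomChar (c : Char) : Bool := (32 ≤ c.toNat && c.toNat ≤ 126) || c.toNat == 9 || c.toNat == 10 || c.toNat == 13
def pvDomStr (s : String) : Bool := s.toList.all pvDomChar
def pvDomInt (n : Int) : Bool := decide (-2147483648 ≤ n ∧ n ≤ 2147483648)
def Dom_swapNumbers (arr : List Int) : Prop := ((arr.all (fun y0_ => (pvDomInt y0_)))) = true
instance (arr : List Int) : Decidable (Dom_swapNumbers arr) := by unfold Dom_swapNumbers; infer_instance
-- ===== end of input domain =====

-- B replaces A's two adjacent-swap while loops by one pop/insert move plus arithmetic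
-- (objective: simpler). Both A and B mutate `arr` in Python, to the same final list;
-- the equivalence proved here is about the return value.


-- ===== PORT A =====
-- arr[mi], arr[mi-1] = arr[mi-1], arr[mi]  (swap positions k and k+1, RHS read first)
def pvSwapAdj (arr : List Int) (k : Nat) : List Int :=
  (arr.set (k+1) (arr.getD k 0)).set k (arr.getD (k+1) 0)

-- while min_index > 0: swap down, swaps += 1, min_index -= 1
def pvLoop1 : List Int → Nat → Int → List Int × Int
  | arr, 0, swaps => (arr, swaps)
  | arr, k+1, swaps => pvLoop1 (pvSwapAdj arr k) k (swaps + 1)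

-- while max_index < len(arr) - 1: swap up, max_index += 1, swaps += 1
def pvLoop2 (arr : List Int) (mi : Nat) (swaps : Int) : Int :=
  if mi < arr.length - 1 then
    pvLoop2 (pvSwapAdj arr mi) (mi + 1) (swaps + 1)
  else swaps
termination_by arr.length - mi
decreasing_by simp [pvSwapAdj]; omega

def swapNumbers (arr : List Int) : Int :=
  match PySem.List.min? arr (fun x => x) with
  | none => 0  -- unreachable under Pre_: Python's min([]) raises ValueError
  | some m =>
    let mi := (PySem.List.index? arr m).getD 0
    let st := pvLoop1 arr mi 0
    match PySem.List.max? st.1 (fun x => x) with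
    | none => 0
    | some mx =>
      pvLoop2 st.1 ((PySem.List.index? st.1 mx).getD 0) st.2

-- ===== PORT B =====
def swapNumbers_alt (arr : List Int) : Int :=
  match PySem.List.min? arr (fun x => x) with
  | none => 0  -- unreachable under Pre_: Python's min([]) raises ValueError
  | some m =>
    let i := (PySem.List.index? arr m).getD 0
    -- arr.pop(i); arr.insert(0, m)
    let arr1 := m :: arr.eraseIdx i
    match PySem.List.max? arr1 (fun x => x) with
    | none => 0
    | some mx =>
      let j := (PySem.List.index? arr1 mx).getD 0
      (i : Int) + ((arr1.length : Int) - 1 - (j : Int))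

-- ===== PRECONDITION & SPEC =====
-- Pre_ excludes the empty list, on which Python's min([]) raises ValueError.
def Pre_swapNumbers (arr : List Int) : Prop := arr ≠ []
instance (arr : List Int) : Decidable (Pre_swapNumbers arr) := by unfold Pre_swapNumbers; infer_instance
def pvWitness_swapNumbers : List Int := [3, 1, 2]

def Spec_swapNumbers (arr : List Int) (out : Int) : Prop := out = swapNumbers_alt arr
instance (arr : List Int) (out : Int) : Decidable (Spec_swapNumbers arr out) := by unfold Spec_swapNumbers; infer_instance

-- ===== CLAIM (what is proved, stated in full; the proofs are below) =====
def Claim_equal_swapNumbers : Prop := ∀ (arr : List Int), Dom_swapNumbers arr → Pre_swapNumbers arr → Spec_swapNumbers arr (swapNumbers arr)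

-- ===== LEMMAS AND PROOFS =====

-- the first loop's swap counter: it just counts mi steps
theorem pvLoop1_snd (mi : Nat) : ∀ (arr : List Int) (s : Int), (pvLoop1 arr mi s).2 = s + mi := by
  induction mi with
  | zero => intro arr s; simp [pvLoop1]
  | succ k ih => intro arr s; simp [pvLoop1, ih]; omega

theorem pvSwapAdj_length (arr : List Int) (k : Nat) : (pvSwapAdj arr k).length = arr.length := by
  simp [pvSwapAdj]

-- the first loop's array: element at position mi moved to the front
theorem pvLoop1_fst (mi : Nat) : ∀ (arr : List Int) (s : Int), mi < arr.length →
    (pvLoop1 arr mi s).1 = arr.getD mi 0 :: arr.eraseIdx mi := by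
  induction mi with
  | zero =>
    intro arr s h
    match arr with
    | a :: t => simp [pvLoop1]
  | succ k ih =>
    intro arr s h
    have hk1 : k + 1 < arr.length := h
    rw [pvLoop1, ih _ _ (by rw [pvSwapAdj_length]; omega)]
    have h1 : (pvSwapAdj arr k).getD k 0 = arr.getD (k+1) 0 := by
      simp only [pvSwapAdj, List.getD]
      rw [List.getElem?_set_self']
      have hk2 : k < arr.length := by omega
      simp [List.getElem?_eq_getElem hk2, Function.const]
    have h2 : (pvSwapAdj arr k).eraseIdx k = arr.eraseIdx (k+1) := by
      clear ih h1
      induction k generalizing arr with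
      | zero =>
        match arr, hk1 with
        | a :: b :: t, _ => simp [pvSwapAdj, List.eraseIdx]
      | succ k' ih' =>
        match arr, hk1 with
        | a :: t, h' =>
          have ht : k' + 1 < t.length := by simpa using h'
          have hs : pvSwapAdj (a :: t) (k' + 1) = a :: pvSwapAdj t k' := by
            simp [pvSwapAdj, List.getD]
          rw [hs]
          simp only [List.eraseIdx_cons_succ]
          exact congrArg (a :: ·) (ih' t ht ht)
    rw [h1, h2]

-- the second loop: counts len - 1 - mi more swaps
theorem pvLoop2_eq (arr : List Int) (mi : Nat) (s : Int) :
    pvLoop2 arr mi s = s + ((arr.length - 1 - mi : Nat) : Int) := by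
  fun_induction pvLoop2 arr mi s with
  | case1 arr mi s h ih =>
    rw [ih, pvSwapAdj_length]
    push_cast [Nat.sub_sub]
    omega
  | case2 arr mi s h =>
    have : arr.length - 1 - mi = 0 := by omega
    rw [this]
    simp

theorem swapNumbers_spec' (arr : List Int) (_hne : arr ≠ []) :
    swapNumbers arr = swapNumbers_alt arr := by
  unfold swapNumbers swapNumbers_alt
  cases hmin : PySem.List.min? arr (fun x => x) with
  | none => rfl
  | some m =>
    have hm : m ∈ arr := PySem.List.min?_mem hmin
    cases hidx : PySem.List.index? arr m with
    | none =>
      simp [PySem.List.index?_eq_idxOf?] at hidx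
      exact absurd hm hidx
    | some i =>
      obtain ⟨hi, hget, -⟩ := PySem.List.getElem_of_index?_eq_some hidx
      simp only [hidx, Option.getD_some]
      have harr1 : (pvLoop1 arr i 0).1 = m :: arr.eraseIdx i := by
        rw [pvLoop1_fst i arr 0 hi]
        congr 1
        simp [List.getD, hi, hget]
      rw [harr1, pvLoop1_snd]
      cases hmax : PySem.List.max? (m :: arr.eraseIdx i) (fun x => x) with
      | none => rfl
      | some mx =>
        have hmx : mx ∈ m :: arr.eraseIdx i := PySem.List.max?_mem hmax
        cases hjdx : PySem.List.index? (m :: arr.eraseIdx i) mx with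
        | none =>
          simp [PySem.List.index?_eq_idxOf?] at hjdx
          simp [List.mem_cons] at hmx
          tauto
        | some j =>
          obtain ⟨hj, -, -⟩ := PySem.List.getElem_of_index?_eq_some hjdx
          simp only [hjdx, Option.getD_some]
          rw [pvLoop2_eq]
          have hlen : (m :: arr.eraseIdx i).length = arr.length - i + i := by
            simp [List.length_eraseIdx, hi]
            omega
          simp only [hlen] at hj ⊢
          push_cast
          omega

-- ===== VERDICT (by name: the statement is the Claim_ definition above) =====
theorem swapNumbers_spec : Claim_equal_swapNumbers := by
  intro arr _ hpre
  exact swapNumbers_spec' arr hpre
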